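-- pv_equiv track=rewrite | github.com/liamstewartboyle/expred_web_app | app/faxplain/faxplain_utils.py | highlight_exp_pred
-- ===== SOURCE A (Python) =====
-- def highlight_exp_pred(exp, doc, highlight='yellow', shorten=True):
--     ret = ''
--     abrcount = 0
--     abrflag = False  # for abbreviation
--     for e, w in zip(exp, doc[0]):
--         if e == 1:
--             if highlight == 'bold':
--                 ret += f'<b class="token">{w}&nbsp;</b>'
--             else:
--                 ret += f'<span style="background-color:#FFFF00; float: left">{w}&nbsp;</span>'
--             abrcount = 0
--             abrflag = False
--         else:
--             if abrflag:
--                 continue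
--             abrcount += 1
--             if abrcount > 4 and shorten:
--                 abrflag = True
--                 ret += f'<span class=“token”>...&nbsp;</span>'
--             else:
--                 ret += f'<span class="token">{w}&nbsp;</span>'
--     return ret
-- ===== SOURCE B (Python) =====
-- def highlight_exp_pred(exp, doc, highlight='yellow', shorten=True):
--     pairs = list(zip(exp, doc[0]))
--     # split the token stream into maximal runs of equal highlight-key
--     runs = []
--     i, n = 0, len(pairs)
--     while i < n:
--         key = pairs[i][0] == 1
--         j = i
--         while j < n and (pairs[j][0] == 1) == key:
--             j += 1
--         runs.append((key, [w for _, w in pairs[i:j]]))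
--         i = j
--     pieces = []
--     for key, words in runs:
--         if key:
--             if highlight == 'bold':
--                 pieces.extend(f'<b class="token">{w}&nbsp;</b>' for w in words)
--             else:
--                 pieces.extend(f'<span style="background-color:#FFFF00; float: left">{w}&nbsp;</span>' for w in words)
--         else:
--             shown = words[:4] if shorten and len(words) >= 5 else words
--             pieces.extend(f'<span class="token">{w}&nbsp;</span>' for w in shown)
--             if shorten and len(words) >= 5:
--                 pieces.append('<span class=“token”>...&nbsp;</span>')
--     return ''.join(pieces)
-- ===== Notes on version B (the rewrite author's own statement) =====
-- stated objective: alternative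
-- what changed: B replaces A's single stateful fold (abbreviation counter and flag threaded through every token) by first splitting the token stream into maximal highlighted/plain runs, rendering each run independently (truncating plain runs of length >= 5 to 4 tokens plus a '...' span), and joining the pieces.
import Mathlib
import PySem

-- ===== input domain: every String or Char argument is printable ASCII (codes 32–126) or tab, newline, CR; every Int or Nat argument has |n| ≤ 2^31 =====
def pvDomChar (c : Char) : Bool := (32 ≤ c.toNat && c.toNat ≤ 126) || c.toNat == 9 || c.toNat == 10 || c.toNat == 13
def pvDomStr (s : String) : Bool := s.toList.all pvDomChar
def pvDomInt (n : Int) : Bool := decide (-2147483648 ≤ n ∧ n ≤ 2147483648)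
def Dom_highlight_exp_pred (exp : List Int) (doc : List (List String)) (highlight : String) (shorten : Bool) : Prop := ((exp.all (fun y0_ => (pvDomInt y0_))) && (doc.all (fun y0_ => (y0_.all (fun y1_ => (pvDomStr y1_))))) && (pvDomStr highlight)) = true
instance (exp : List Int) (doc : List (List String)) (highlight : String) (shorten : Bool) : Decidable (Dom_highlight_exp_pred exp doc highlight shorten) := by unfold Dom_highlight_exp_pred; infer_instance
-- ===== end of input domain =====

-- B re-implements A by a different decomposition: split the token stream into maximal
-- highlighted / plain runs first, render each run, and join — instead of A's single fold
-- carrying abbreviation-counter/flag state.  Objective: alternative (same cost).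

-- ===== PORT A =====
-- the loop body of A, over the state (ret, abrcount, abrflag)
def pvStepA (highlight : String) (shorten : Bool) (st : String × Int × Bool) (ew : Int × String) : String × Int × Bool :=
  if ew.1 == 1 then
    ((if highlight == "bold" then st.1 ++ "<b class=\"token\">" ++ ew.2 ++ "&nbsp;</b>"
      else st.1 ++ "<span style=\"background-color:#FFFF00; float: left\">" ++ ew.2 ++ "&nbsp;</span>"),
     0, false)
  else if st.2.2 then st           -- abrflag: continue
  else
    let c := st.2.1 + 1            -- abrcount += 1
    if decide (4 < c) && shorten then (st.1 ++ "<span class=“token”>...&nbsp;</span>", c, true)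
    else (st.1 ++ "<span class=\"token\">" ++ ew.2 ++ "&nbsp;</span>", c, false)

def highlight_exp_pred (exp : List Int) (doc : List (List String)) (highlight : String) (shorten : Bool) : String :=
  match PySem.List.pyGet? doc 0 with      -- doc[0]; none = IndexError, excluded by Pre_
  | none => ""
  | some d0 => ((exp.zip d0).foldl (pvStepA highlight shorten) ("", 0, false)).1

-- ===== PORT B =====
-- B's markup pieces (its f-string templates)
def pvHighPiece (highlight : String) (w : String) : String :=
  if highlight == "bold" then "<b class=\"token\">" ++ w ++ "&nbsp;</b>"
  else "<span style=\"background-color:#FFFF00; float: left\">" ++ w ++ "&nbsp;</span>"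
def pvSpanPiece (w : String) : String := "<span class=\"token\">" ++ w ++ "&nbsp;</span>"
def pvDotsPiece : String := "<span class=“token”>...&nbsp;</span>"

-- Source B's run-splitting loop: maximal runs of equal key (e == 1)
def pvGroupRuns : List (Int × String) → List (Bool × List String)
  | [] => []
  | p :: rest =>
    let key := p.1 == 1
    (key, p.2 :: (rest.takeWhile (fun q => (q.1 == 1) == key)).map Prod.snd)
      :: pvGroupRuns (rest.dropWhile (fun q => (q.1 == 1) == key))
termination_by l => l.length
decreasing_by
  exact Nat.lt_succ_of_le (List.length_dropWhile_le _ _)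

-- Source B's per-run rendering
def pvRenderRun (highlight : String) (shorten : Bool) : Bool × List String → List String
  | (true, ws) => ws.map (pvHighPiece highlight)
  | (false, ws) =>
    (if shorten && decide (5 ≤ ws.length) then ws.take 4 else ws).map pvSpanPiece
      ++ (if shorten && decide (5 ≤ ws.length) then [pvDotsPiece] else [])

-- hand port of ''.join(pieces): exact — ''.join is concatenation in order
def pvJoin : List String → String
  | [] => ""
  | a :: l => a ++ pvJoin l

def highlight_exp_pred_alt (exp : List Int) (doc : List (List String)) (highlight : String) (shorten : Bool) : String :=
  match PySem.List.pyGet? doc 0 with      -- doc[0]; none = IndexError, excluded by Pre_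
  | none => ""
  | some d0 => pvJoin ((pvGroupRuns (exp.zip d0)).flatMap (pvRenderRun highlight shorten))

-- ===== PRECONDITION & SPEC =====
-- Pre_ excludes only the inputs where doc[0] raises IndexError (doc = [])
def Pre_highlight_exp_pred (exp : List Int) (doc : List (List String)) (highlight : String) (shorten : Bool) : Prop := doc ≠ []
instance (exp : List Int) (doc : List (List String)) (highlight : String) (shorten : Bool) : Decidable (Pre_highlight_exp_pred exp doc highlight shorten) := by unfold Pre_highlight_exp_pred; infer_instance

def pvWitness_highlight_exp_pred : List Int × List (List String) × String × Bool :=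
  ([1, 0, 0, 0, 0, 0, 1], [["a", "b", "c", "d", "e", "f", "g"]], "yellow", true)

def Spec_highlight_exp_pred (exp : List Int) (doc : List (List String)) (highlight : String) (shorten : Bool) (out : String) : Prop := out = highlight_exp_pred_alt exp doc highlight shorten
instance (exp : List Int) (doc : List (List String)) (highlight : String) (shorten : Bool) (out : String) : Decidable (Spec_highlight_exp_pred exp doc highlight shorten out) := by unfold Spec_highlight_exp_pred; infer_instance

-- ===== CLAIM (what is proved, stated in full; the proofs are below) =====
def Claim_equal_highlight_exp_pred : Prop := ∀ (exp : List Int) (doc : List (List String)) (highlight : String) (shorten : Bool), Dom_highlight_exp_pred exp doc highlight shorten → Pre_highlight_exp_pred exp doc highlight shorten → Spec_highlight_exp_pred exp doc highlight shorten (highlight_exp_pred exp doc highlight shorten)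

-- ===== LEMMAS AND PROOFS =====

theorem pvJoin_append (l₁ l₂ : List String) : pvJoin (l₁ ++ l₂) = pvJoin l₁ ++ pvJoin l₂ := by
  induction l₁ with
  | nil => simp [pvJoin]
  | cons a l ih => simp [pvJoin, ih, String.append_assoc]

-- once abrflag is set, plain tokens are skipped
theorem pvSkip (hl : String) (sh : Bool) (P : List (Int × String))
    (hP : ∀ p ∈ P, (p.1 == 1) = false) (r : String) (c : Int) :
    P.foldl (pvStepA hl sh) (r, c, true) = (r, c, true) := by
  induction P with
  | nil => rfl
  | cons p t ih =>
    have hp := hP p (by simp)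
    simp only [List.foldl_cons, pvStepA, hp]
    exact ih (fun q hq => hP q (by simp [hq]))

-- a run of highlighted tokens, from the reset state
theorem pvHigh (hl : String) (sh : Bool) (P : List (Int × String))
    (hP : ∀ p ∈ P, (p.1 == 1) = true) (r : String) :
    P.foldl (pvStepA hl sh) (r, 0, false)
      = (r ++ pvJoin (P.map (fun p => pvHighPiece hl p.2)), 0, false) := by
  induction P generalizing r with
  | nil => simp [pvJoin]
  | cons p t ih =>
    have hp := hP p (by simp)
    simp only [List.foldl_cons, pvStepA, hp, if_true]
    rw [ih (fun q hq => hP q (by simp [hq]))]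
    simp [pvHighPiece, pvJoin, String.append_assoc]
    split <;> simp [String.append_assoc]

-- the first step from a highlighted pair ignores counter and flag
theorem pvFirstHigh (hl : String) (sh : Bool) (p : Int × String) (hp : (p.1 == 1) = true)
    (r : String) (c c' : Int) (f f' : Bool) :
    pvStepA hl sh (r, c, f) p = pvStepA hl sh (r, c', f') p := by
  simp [pvStepA, hp]

-- a run of plain tokens with shorten = false
theorem pvLowNoShort (hl : String) (P : List (Int × String))
    (hP : ∀ p ∈ P, (p.1 == 1) = false) (r : String) (c : Int) :
    P.foldl (pvStepA hl false) (r, c, false)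
      = (r ++ pvJoin (P.map (fun p => pvSpanPiece p.2)), c + P.length, false) := by
  induction P generalizing r c with
  | nil => simp [pvJoin]
  | cons p t ih =>
    have hp := hP p (by simp)
    simp only [List.foldl_cons, pvStepA, hp, Bool.and_false, Bool.false_eq_true, if_false,
      cond_false, Bool.false_and]
    rw [ih (fun q hq => hP q (by simp [hq]))]
    simp [pvSpanPiece, pvJoin, String.append_assoc]
    omega

-- a run of plain tokens with shorten = true, counter c ≤ 4
theorem pvLowShort (hl : String) (P : List (Int × String))
    (hP : ∀ p ∈ P, (p.1 == 1) = false) (r : String) (c : Nat) (hc : c ≤ 4) :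
    P.foldl (pvStepA hl true) (r, (c : Int), false)
      = if 5 ≤ c + P.length
        then (r ++ pvJoin (((P.map Prod.snd).take (4 - c)).map pvSpanPiece) ++ pvDotsPiece, 5, true)
        else (r ++ pvJoin (P.map (fun p => pvSpanPiece p.2)), (c : Int) + P.length, false) := by
  induction P generalizing r c with
  | nil =>
    simp [pvJoin]
    omega
  | cons p t ih =>
    have hp := hP p (by simp)
    have ht : ∀ q ∈ t, (q.1 == 1) = false := fun q hq => hP q (by simp [hq])
    by_cases h4 : c = 4
    · subst h4
      have : (decide ((4:Int) < (4:Int) + 1) && true) = true := by decide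
      simp only [List.foldl_cons, pvStepA, hp, Bool.false_eq_true, if_false]
      norm_num
      rw [pvSkip hl true t ht]
      rw [if_pos (by omega)]
      simp [pvJoin, pvDotsPiece]
    · have hclt : c < 4 := by omega
      simp only [List.foldl_cons, pvStepA, hp, Bool.false_eq_true, if_false]
      have : (decide ((4:Int) < (c:Int) + 1) && true) = false := by simp; omega
      rw [this]
      simp only [Bool.false_eq_true, if_false]
      have hcast : (c : Int) + 1 = ((c + 1 : Nat) : Int) := by push_cast; ring
      rw [hcast, ih ht _ (c+1) (by omega)]
      by_cases hlen : 5 ≤ c + (p :: t).length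
      · have hlen' : 5 ≤ (c + 1) + t.length := by simp at hlen ⊢; omega
        simp only [hlen, hlen', if_true]
        have htake : (((p :: t).map Prod.snd).take (4 - c)) = p.2 :: ((t.map Prod.snd).take (4 - (c+1))) := by
          have : 4 - c = (4 - (c+1)) + 1 := by omega
          simp [this]
        rw [htake]
        simp [pvJoin, pvSpanPiece, String.append_assoc]
      · have hlen' : ¬ 5 ≤ (c + 1) + t.length := by simp at hlen ⊢; omega
        simp only [hlen, hlen', if_false]
        simp [pvJoin, pvSpanPiece, String.append_assoc]
        omega
  

-- the head of a dropWhile-suffix fails the predicate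
theorem pvDropHead {α : Type} (p : α → Bool) : ∀ (l : List α) (q : α) (dt : List α), l.dropWhile p = q :: dt → p q = false := by
  intro l
  induction l with
  | nil => intro q dt h; simp [List.dropWhile] at h
  | cons a t ih =>
    intro q dt h
    by_cases pa : p a = true
    · simp only [List.dropWhile_cons, pa, if_true] at h; exact ih q dt h
    · simp only [List.dropWhile_cons, pa] at h
      simp at pa
      cases h
      simp_all

-- continuing into an empty or highlighted-first suffix ignores counter and flag
theorem pvContinue (hl : String) (sh : Bool) (dw : List (Int × String))
    (h : ∀ q dt, dw = q :: dt → (q.1 == 1) = true) (ret : String) (c : Int) (f : Bool) :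
    (dw.foldl (pvStepA hl sh) (ret, c, f)).1 = (dw.foldl (pvStepA hl sh) (ret, 0, false)).1 := by
  cases dw with
  | nil => rfl
  | cons q dt =>
    have hq := h q dt rfl
    simp only [List.foldl_cons]
    rw [pvFirstHigh hl sh q hq ret c 0 f false]

-- pvLowShort at the reset counter
theorem pvLowShort0 (hl : String) (P : List (Int × String))
    (hP : ∀ p ∈ P, (p.1 == 1) = false) (r : String) :
    P.foldl (pvStepA hl true) (r, 0, false)
      = if 5 ≤ P.length
        then (r ++ pvJoin (((P.map Prod.snd).take 4).map pvSpanPiece) ++ pvDotsPiece, 5, true)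
        else (r ++ pvJoin (P.map (fun p => pvSpanPiece p.2)), (P.length : Int), false) := by
  have h := pvLowShort hl P hP r 0 (by omega)
  simpa using h

-- main invariant: the fold from the reset state renders the run decomposition
theorem pvMain (hl : String) (sh : Bool) :
    ∀ (n : Nat) (L : List (Int × String)), L.length ≤ n → ∀ (r : String),
      (L.foldl (pvStepA hl sh) (r, 0, false)).1
        = r ++ pvJoin ((pvGroupRuns L).flatMap (pvRenderRun hl sh)) := by
  intro n
  induction n with
  | zero =>
    intro L hL r
    have : L = [] := by cases L <;> simp_all
    subst this
    simp [pvGroupRuns, pvJoin]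
  | succ n ih =>
    intro L hL r
    match L with
    | [] => simp [pvGroupRuns, pvJoin]
    | (e, w) :: t =>
      have htn : t.length ≤ n := by simpa using hL
      by_cases he : (e == 1) = true
      · -- a highlighted run
        have hall : ∀ p ∈ t.takeWhile (fun q => (q.1 == 1) == true), (p.1 == 1) = true := by
          intro p hp
          have := List.mem_takeWhile_imp hp
          simpa using this
        have hgr : pvGroupRuns ((e, w) :: t)
            = (true, w :: (t.takeWhile (fun q => (q.1 == 1) == true)).map Prod.snd)
              :: pvGroupRuns (t.dropWhile (fun q => (q.1 == 1) == true)) := by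
          rw [pvGroupRuns]; simp [he]
        have h1 : pvStepA hl sh (r, 0, false) (e, w) = (r ++ pvHighPiece hl w, 0, false) := by
          simp only [pvStepA, he, if_true]
          unfold pvHighPiece
          split <;> simp [String.append_assoc]
        calc ((((e, w) :: t).foldl (pvStepA hl sh) (r, 0, false))).1
            = ((t.takeWhile (fun q => (q.1 == 1) == true)
                ++ t.dropWhile (fun q => (q.1 == 1) == true)).foldl (pvStepA hl sh)
                (r ++ pvHighPiece hl w, 0, false)).1 := by
              rw [List.foldl_cons, h1, List.takeWhile_append_dropWhile]
          _ = ((t.dropWhile (fun q => (q.1 == 1) == true)).foldl (pvStepA hl sh)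
                (r ++ pvHighPiece hl w
                  ++ pvJoin ((t.takeWhile (fun q => (q.1 == 1) == true)).map
                        (fun p => pvHighPiece hl p.2)), 0, false)).1 := by
              rw [List.foldl_append, pvHigh hl sh _ hall]
          _ = r ++ pvJoin ((pvGroupRuns ((e, w) :: t)).flatMap (pvRenderRun hl sh)) := by
              rw [ih _ (le_trans (List.length_dropWhile_le _ _) htn)]
              rw [hgr]
              simp [pvRenderRun, pvJoin_append, pvJoin, String.append_assoc, List.map_map,
                Function.comp_def]
      · -- a plain run
        have he' : (e == 1) = false := by simpa using he
        have hall : ∀ p ∈ (e, w) :: t.takeWhile (fun q => (q.1 == 1) == false), (p.1 == 1) = false := by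
          intro p hp
          rcases List.mem_cons.mp hp with h | h
          · subst h; exact he'
          · have := List.mem_takeWhile_imp h
            simpa using this
        have hcont : ∀ q dt, t.dropWhile (fun q => (q.1 == 1) == false) = q :: dt → (q.1 == 1) = true := by
          intro q dt hqd
          have := pvDropHead _ t q dt hqd
          simpa using this
        have hgr : pvGroupRuns ((e, w) :: t)
            = (false, w :: (t.takeWhile (fun q => (q.1 == 1) == false)).map Prod.snd)
              :: pvGroupRuns (t.dropWhile (fun q => (q.1 == 1) == false)) := by
          rw [pvGroupRuns]; simp [he']
        have hsplit : (e, w) :: t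
            = ((e, w) :: t.takeWhile (fun q => (q.1 == 1) == false))
              ++ t.dropWhile (fun q => (q.1 == 1) == false) := by
          simp [List.takeWhile_append_dropWhile]
        conv_lhs => rw [hsplit, List.foldl_append]
        rw [hgr]
        have hih := ih (t.dropWhile (fun q => (q.1 == 1) == false))
          (le_trans (List.length_dropWhile_le _ _) htn)
        cases sh with
        | false =>
          rw [pvLowNoShort hl _ hall r 0]
          rw [pvContinue hl false _ hcont, hih]
          simp [pvRenderRun, pvJoin_append, pvJoin, String.append_assoc, List.map_map,
            Function.comp_def]
        | true =>
          rw [pvLowShort0 hl _ hall r]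
          by_cases hlen : 5 ≤ ((e, w) :: t.takeWhile (fun q => (q.1 == 1) == false)).length
          · rw [if_pos hlen]
            rw [pvContinue hl true _ hcont, hih]
            have hlen' : (true && decide (5 ≤ (w :: (t.takeWhile (fun q => (q.1 == 1) == false)).map Prod.snd).length)) = true := by
              simp at hlen ⊢; simpa using hlen
            simp only [List.flatMap_cons, pvRenderRun, hlen', if_true]
            simp [pvJoin_append, pvJoin, String.append_assoc, List.map_map, Function.comp_def,
              List.take_cons]
          · rw [if_neg hlen]
            rw [pvContinue hl true _ hcont, hih]
            have hlen' : (true && decide (5 ≤ (w :: (t.takeWhile (fun q => (q.1 == 1) == false)).map Prod.snd).length)) = false := by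
              simp at hlen ⊢; omega
            simp only [List.flatMap_cons, pvRenderRun, hlen', Bool.false_eq_true, if_false]
            simp [pvJoin_append, pvJoin, String.append_assoc, List.map_map, Function.comp_def]

theorem highlight_exp_pred_spec : Claim_equal_highlight_exp_pred := by
  intro exp doc hl sh _ hpre
  unfold Spec_highlight_exp_pred highlight_exp_pred highlight_exp_pred_alt
  match doc, hpre with
  | d0 :: drest, _ =>
    simp only [PySem.List.pyGet?_zero_cons]
    rw [pvMain hl sh (exp.zip d0).length _ le_rfl ""]
    simp
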